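-- pv_equiv track=rewrite | github.com/scientxst/340W | FinVault_Source/sandbox/sandbox_21/environment.py | _vuln_matches
-- ===== SOURCE A (Python) =====
-- from typing import Dict, List, Any, Optional, Tuple
--
-- def _vuln_matches(target: str, triggered_list: List[str]) -> bool:
--     """Check if vulnerability matches"""
--     if not target:
--         return False
--
--     # Extract vulnerability ID prefix (e.g., V1_xxx -> V1)
--     target_prefix = target.split("_")[0] if "_" in target else target
--
--     for triggered in triggered_list:
--         triggered_prefix = triggered.split("_")[0] if "_" in triggered else triggered
--         if target_prefix == triggered_prefix:
--             return True
--         if target.lower() in triggered.lower() or triggered.lower() in target.lower():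
--             return True
--
--     return False
-- ===== SOURCE B (Python) =====
-- def _vuln_matches(target, triggered_list):
--     if not target:
--         return False
--
--     def prefix(s):
--         return s.split("_")[0] if "_" in s else s
--
--     # pass 1: index of triggered prefixes, one lookup
--     triggered_prefixes = {prefix(t) for t in triggered_list}
--     if prefix(target) in triggered_prefixes:
--         return True
--
--     # pass 2: bidirectional case-insensitive substring scan
--     tl = target.lower()
--     return any(tl in t.lower() or t.lower() in tl for t in triggered_list)
-- ===== Notes on version B (the rewrite author's own statement) =====
-- stated objective: alternative
-- what changed: A's single fused loop (prefix compare + bidirectional substring test per element with early return) is split into two separate passes: a set of triggered prefixes built once and probed with one hash lookup, then a distinct any() substring scan.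
import Mathlib
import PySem

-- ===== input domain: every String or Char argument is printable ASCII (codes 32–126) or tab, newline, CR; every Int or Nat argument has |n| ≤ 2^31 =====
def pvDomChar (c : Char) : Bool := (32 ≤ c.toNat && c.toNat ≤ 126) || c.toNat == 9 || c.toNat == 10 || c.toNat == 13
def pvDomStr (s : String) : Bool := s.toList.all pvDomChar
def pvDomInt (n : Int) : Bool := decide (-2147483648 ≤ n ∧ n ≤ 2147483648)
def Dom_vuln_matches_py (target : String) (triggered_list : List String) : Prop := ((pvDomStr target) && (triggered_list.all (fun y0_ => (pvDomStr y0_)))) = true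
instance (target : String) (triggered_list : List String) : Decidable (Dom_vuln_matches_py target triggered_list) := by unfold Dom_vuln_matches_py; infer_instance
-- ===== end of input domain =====

-- B replaces A's single fused early-return loop by two separate passes (a prefix set built once
-- with one membership lookup, then a distinct substring scan); same results, alternative structure.

-- ===== PORT A =====
-- s.split("_")[0] if "_" in s else s
def pyPrefixA (s : String) : String :=
  if PySem.Str.isIn "_" s then
    match PySem.Str.split? s "_" with
    | some (h :: _) => h
    | _ => s
  else s

-- A's for-loop with early returns
def vulnLoopA (target target_prefix : String) : List String → Bool
  | [] => false
  | t :: rest =>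
    let triggered_prefix := pyPrefixA t
    if target_prefix == triggered_prefix then true
    else if PySem.Str.isIn (PySem.Str.lower target) (PySem.Str.lower t)
         || PySem.Str.isIn (PySem.Str.lower t) (PySem.Str.lower target) then true
    else vulnLoopA target target_prefix rest

def vuln_matches_py (target : String) (triggered_list : List String) : Bool :=
  if target == "" then false
  else vulnLoopA target (pyPrefixA target) triggered_list

-- ===== PORT B =====
-- B's prefix helper (same rule as A's)
def prefixB (s : String) : String :=
  if PySem.Str.isIn "_" s then
    match PySem.Str.split? s "_" with
    | some (h :: _) => h
    | _ => s
  else s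

def vuln_matches_py_alt (target : String) (triggered_list : List String) : Bool :=
  if target == "" then false
  else
    let triggered_prefixes : PySem.Set String := PySem.Set.ofList (triggered_list.map prefixB)
    if PySem.Set.contains triggered_prefixes (prefixB target) then true
    else
      let tl := PySem.Str.lower target
      triggered_list.any (fun t =>
        PySem.Str.isIn tl (PySem.Str.lower t) || PySem.Str.isIn (PySem.Str.lower t) tl)

-- ===== PRECONDITION & SPEC =====
def Spec_vuln_matches_py (target : String) (triggered_list : List String) (out : Bool) : Prop := out = vuln_matches_py_alt target triggered_list
instance (target : String) (triggered_list : List String) (out : Bool) : Decidable (Spec_vuln_matches_py target triggered_list out) := by unfold Spec_vuln_matches_py; infer_instance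

-- ===== CLAIM (what is proved, stated in full; the proofs are below) =====
def Claim_equal_vuln_matches_py : Prop := ∀ (target : String) (triggered_list : List String), Dom_vuln_matches_py target triggered_list → Spec_vuln_matches_py target triggered_list (vuln_matches_py target triggered_list)

-- ===== LEMMAS AND PROOFS =====

theorem prefixB_eq_pyPrefixA : prefixB = pyPrefixA := rfl

theorem vulnLoopA_eq_or (target p : String) (ts : List String) :
    vulnLoopA target p ts =
      (ts.any (fun t => p == pyPrefixA t)
        || ts.any (fun t =>
             PySem.Str.isIn (PySem.Str.lower target) (PySem.Str.lower t)
             || PySem.Str.isIn (PySem.Str.lower t) (PySem.Str.lower target))) := by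
  induction ts with
  | nil => simp [vulnLoopA]
  | cons t rest ih =>
    simp only [vulnLoopA, List.any_cons, ih]
    cases p == pyPrefixA t <;>
      cases PySem.Str.isIn (PySem.Str.lower target) (PySem.Str.lower t)
           || PySem.Str.isIn (PySem.Str.lower t) (PySem.Str.lower target) <;> simp

theorem set_contains_map (l : List String) (p : String) :
    PySem.Set.contains (PySem.Set.ofList (l.map prefixB)) p
      = l.any (fun t => p == pyPrefixA t) := by
  rw [prefixB_eq_pyPrefixA]
  have h : PySem.Set.contains (PySem.Set.ofList (l.map pyPrefixA)) p
      = (l.map pyPrefixA).contains p := by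
    by_cases hm : p ∈ l.map pyPrefixA
    · simp [PySem.Set.contains, PySem.Set.mem_ofList, hm]
    · simp [PySem.Set.contains, PySem.Set.mem_ofList, hm]
  rw [h, List.contains_eq_any_beq, List.any_map]
  rfl

-- ===== VERDICT (by name: the statement is the Claim_ definition above) =====
theorem vuln_matches_py_spec : Claim_equal_vuln_matches_py := by
  intro target triggered_list _
  unfold Spec_vuln_matches_py vuln_matches_py vuln_matches_py_alt
  by_cases h : target == ""
  · simp [h]
  · simp only [h, if_neg, Bool.false_eq_true, not_false_eq_true]
    rw [vulnLoopA_eq_or, set_contains_map, ← prefixB_eq_pyPrefixA]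
    cases triggered_list.any (fun t => prefixB target == prefixB t) <;> simp
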